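-- pv_equiv track=rewrite | github.com/Teranis/Data-Analysis | data_analysis/core.py | create_uniques_list
-- ===== SOURCE A (Python) =====
-- def create_uniques_list(name_list):
--     name_unique = []
--     for i, name in enumerate(name_list):
--         if name not in [entry[0] for entry in name_unique]:
--             name_unique.append([name, i, 1])
--         else:
--             for inx, name2 in enumerate([entry[0] for entry in name_unique]):
--                 if name == name2:
--                     inx_match = inx
--                     break
--             name_unique[inx_match][2] = name_unique[inx_match][2] + 1
--     return name_unique
-- ===== SOURCE B (Python) =====
-- def create_uniques_list(name_list):
--     counts = {}
--     for name in name_list: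
--         counts[name] = counts.get(name, 0) + 1
--     result = []
--     seen = set()
--     for i, name in enumerate(name_list):
--         if name not in seen:
--             seen.add(name)
--             result.append([name, i, counts[name]])
--     return result
-- ===== Notes on version B (the rewrite author's own statement) =====
-- stated objective: faster
-- what changed: Replaces A's single-pass list with an inner linear scan/find-and-increment per element by a count-first-then-emit two-pass: a dict frequency table built once, then one pass emitting each name on its first occurrence with its precomputed total count.
import Mathlib
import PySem

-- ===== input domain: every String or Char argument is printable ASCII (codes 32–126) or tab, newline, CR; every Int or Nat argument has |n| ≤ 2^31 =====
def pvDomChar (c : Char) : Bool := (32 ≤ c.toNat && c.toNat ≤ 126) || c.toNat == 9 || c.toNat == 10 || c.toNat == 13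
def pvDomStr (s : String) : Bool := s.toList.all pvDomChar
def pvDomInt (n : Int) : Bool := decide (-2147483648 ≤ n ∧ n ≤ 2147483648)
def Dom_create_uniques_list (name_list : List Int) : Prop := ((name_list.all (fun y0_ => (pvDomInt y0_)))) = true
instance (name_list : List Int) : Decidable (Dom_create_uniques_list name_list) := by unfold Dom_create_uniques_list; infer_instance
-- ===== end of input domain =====

-- B replaces A's find-and-increment inner scan by a count-first, then emit-on-first-occurrence two-pass (faster: one dict pass instead of an inner list scan per element).

-- ===== PORT A =====
-- [entry[0] for entry in name_unique]  (rows are always 3-element lists, so entry[0] never raises)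
def pvHeads (acc : List (List Int)) : List Int :=
  acc.map (fun e => PySem.List.pyGetD e 0 0)

-- one iteration of A's outer loop: append a fresh row, or find the matching row (inner loop = first index with equal head) and bump its count
def pvAStep (acc : List (List Int)) (p : Int × Int) : List (List Int) :=
  if p.2 ∉ pvHeads acc then
    acc ++ [[p.2, p.1, 1]]
  else
    match PySem.List.index? (pvHeads acc) p.2 with
    | some inx => acc.modify inx (fun r => PySem.List.pySetD r 2 (PySem.List.pyGetD r 2 0 + 1))
    | none => acc   -- unreachable: the head is a member

def create_uniques_list (name_list : List Int) : List (List Int) :=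
  (PySem.List.enumerate name_list 0).foldl pvAStep []

-- ===== PORT B =====
def create_uniques_list_alt (name_list : List Int) : List (List Int) :=
  -- pass 1: counts[name] = counts.get(name, 0) + 1
  let counts : PySem.Dict Int Int :=
    name_list.foldl (fun d n => d.insert n (d.getD n 0 + 1)) PySem.Dict.empty
  -- pass 2: emit [name, i, counts[name]] on first occurrence (counts[name] always present, so getD is exact)
  ((PySem.List.enumerate name_list 0).foldl
    (fun st p =>
      if PySem.Set.contains st.1 p.2 then st
      else (PySem.Set.add st.1 p.2, st.2 ++ [[p.2, p.1, counts.getD p.2 0]]))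
    ((PySem.Set.empty : PySem.Set Int), ([] : List (List Int)))).2

-- ===== PRECONDITION & SPEC =====
def Spec_create_uniques_list (name_list : List Int) (out : List (List Int)) : Prop := out = create_uniques_list_alt name_list
instance (name_list : List Int) (out : List (List Int)) : Decidable (Spec_create_uniques_list name_list out) := by unfold Spec_create_uniques_list; infer_instance

-- ===== CLAIM (what is proved, stated in full; the proofs are below) =====
def Claim_equal_create_uniques_list : Prop := ∀ (name_list : List Int), Dom_create_uniques_list name_list → Spec_create_uniques_list name_list (create_uniques_list name_list)

-- ===== LEMMAS AND PROOFS =====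

-- canonical description of both results: distinct names in first-occurrence order, each with its first index and an abstract count
def pvCanon (cnt : Int → Int) (l : List Int) : List (List Int) :=
  (PySem.Set.ofList l).map (fun n => [n, ((List.idxOf n l : Nat) : Int), cnt n])

theorem pvCanon_congr {cnt cnt' : Int → Int} {l : List Int}
    (h : ∀ n ∈ l, cnt n = cnt' n) : pvCanon cnt l = pvCanon cnt' l := by
  simp only [pvCanon]
  exact List.map_congr_left fun n hn => by
    rw [h n ((PySem.Set.mem_ofList l n).1 hn)]

theorem pvHeads_canon (cnt : Int → Int) (l : List Int) :
    pvHeads (pvCanon cnt l) = PySem.Set.ofList l := by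
  simp only [pvHeads, pvCanon, List.map_map]
  exact (List.map_congr_left fun n _ => rfl).trans (List.map_id _)

theorem pvIdxOf?_of_mem {x : Int} {ns : List Int} (h : x ∈ ns) :
    ns.idxOf? x = some (List.idxOf x ns) := by
  induction ns with
  | nil => cases h
  | cons a t ih =>
    rw [List.idxOf?_cons, List.idxOf_cons]
    by_cases hax : a = x
    · simp [hax]
    · have hxt : x ∈ t := by
        rcases List.mem_cons.1 h with h' | h'
        · exact absurd h'.symm hax
        · exact h'
      have hb : (a == x) = false := by simp [hax]
      simp [hb, ih hxt]

theorem pvMap_modify {x : Int} (f : Int → List Int) (g : List Int → List Int) :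
    ∀ (ns : List Int), ns.Nodup → x ∈ ns →
      (ns.map f).modify (List.idxOf x ns) g
        = ns.map (fun n => if n = x then g (f n) else f n) := by
  intro ns
  induction ns with
  | nil => intro _ hx; cases hx
  | cons a t ih =>
    intro hnd hx
    rw [List.idxOf_cons]
    by_cases hax : a = x
    · subst hax
      have hat : a ∉ t := (List.nodup_cons.1 hnd).1
      simp [List.modify_cons]
      intro b hb e
      exact absurd (e ▸ hb) hat
    · have hxt : x ∈ t := by
        rcases List.mem_cons.1 hx with h' | h'
        · exact absurd h'.symm hax
        · exact h'
      have hb : (a == x) = false := by simp [hax]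
      simp only [hb, cond_false, List.map_cons, List.modify_cons,
        Nat.add_sub_cancel, if_neg (Nat.succ_ne_zero _), if_neg hax]
      rw [ih (List.nodup_cons.1 hnd).2 hxt]

theorem pvOfList_append_mem {x : Int} {l : List Int} (h : x ∈ l) :
    PySem.Set.ofList (l ++ [x]) = PySem.Set.ofList l := by
  rw [PySem.Set.ofList_eq_foldl, List.foldl_append, ← PySem.Set.ofList_eq_foldl]
  simp [PySem.Set.add, PySem.Set.contains, PySem.Set.mem_ofList, h]

theorem pvOfList_append_not_mem {x : Int} {l : List Int} (h : x ∉ l) :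
    PySem.Set.ofList (l ++ [x]) = PySem.Set.ofList l ++ [x] := by
  rw [PySem.Set.ofList_eq_foldl, List.foldl_append, ← PySem.Set.ofList_eq_foldl]
  simp [PySem.Set.add, PySem.Set.contains, PySem.Set.mem_ofList, h]

theorem pvCanon_append_mem {x : Int} {l : List Int} (cnt : Int → Int) (h : x ∈ l) :
    pvCanon cnt (l ++ [x]) = pvCanon cnt l := by
  simp only [pvCanon]
  rw [pvOfList_append_mem h]
  exact List.map_congr_left fun n hn => by
    rw [List.idxOf_append, if_pos ((PySem.Set.mem_ofList l n).1 hn)]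

theorem pvCanon_append_not_mem {x : Int} {l : List Int} (cnt : Int → Int) (h : x ∉ l) :
    pvCanon cnt (l ++ [x]) = pvCanon cnt l ++ [[x, (l.length : Int), cnt x]] := by
  simp only [pvCanon]
  rw [pvOfList_append_not_mem h, List.map_append]
  congr 1
  · exact List.map_congr_left fun n hn => by
      rw [List.idxOf_append, if_pos ((PySem.Set.mem_ofList l n).1 hn)]
  · simp [List.idxOf_append, h]

theorem pvAStep_mem {x : Int} {l : List Int} (cnt : Int → Int) (i : Int) (h : x ∈ l) :
    pvAStep (pvCanon cnt l) (i, x)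
      = pvCanon (fun n => if n = x then cnt n + 1 else cnt n) l := by
  have hmem : x ∈ PySem.Set.ofList l := (PySem.Set.mem_ofList l x).2 h
  simp only [pvAStep, pvHeads_canon]
  rw [if_neg (not_not_intro hmem)]
  rw [PySem.List.index?_eq_idxOf?, pvIdxOf?_of_mem hmem]
  simp only [pvCanon]
  rw [pvMap_modify _ _ _ (PySem.Set.nodup_ofList l) hmem]
  exact List.map_congr_left fun n hn => by
    by_cases hnx : n = x
    · subst hnx
      rw [if_pos rfl, if_pos rfl]
      rfl
    · simp [hnx]

theorem pvAStep_not_mem {x : Int} {l : List Int} (cnt : Int → Int) (i : Int) (h : x ∉ l) :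
    pvAStep (pvCanon cnt l) (i, x) = pvCanon cnt l ++ [[x, i, 1]] := by
  have hmem : x ∉ PySem.Set.ofList l := fun hc => h ((PySem.Set.mem_ofList l x).1 hc)
  simp only [pvAStep, pvHeads_canon]
  rw [if_pos hmem]

theorem pvA_eq_canon (l : List Int) :
    create_uniques_list l = pvCanon (fun n => (List.count n l : Int)) l := by
  induction l using List.reverseRecOn with
  | nil => rfl
  | append_singleton l x ih =>
    unfold create_uniques_list at *
    rw [PySem.List.enumerate_append, List.foldl_append]
    simp only [PySem.List.enumerate_cons, PySem.List.enumerate_nil,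
      List.foldl_cons, List.foldl_nil]
    rw [ih]
    by_cases hx : x ∈ l
    · rw [pvAStep_mem _ _ hx, pvCanon_append_mem _ hx]
      refine pvCanon_congr fun n hn => ?_
      by_cases hnx : n = x
      · subst hnx
        simp [List.count_append]
      · have hxn : ¬ x = n := fun e => hnx e.symm
        simp [hnx, List.count_append, hxn]
    · rw [pvAStep_not_mem _ _ hx, pvCanon_append_not_mem _ hx]
      congr 1
      · refine pvCanon_congr fun n hn => ?_
        have hnx : ¬ x = n := fun e => hx (e ▸ hn)
        simp [List.count_append, hnx]
      · have hc : List.count x l = 0 := List.count_eq_zero.2 hx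
        simp [List.count_append, hc]

theorem pvB_pass (counts : PySem.Dict Int Int) (l : List Int) :
    (PySem.List.enumerate l 0).foldl
      (fun st p =>
        if PySem.Set.contains st.1 p.2 then st
        else (PySem.Set.add st.1 p.2, st.2 ++ [[p.2, p.1, counts.getD p.2 0]]))
      ((PySem.Set.empty : PySem.Set Int), ([] : List (List Int)))
    = (PySem.Set.ofList l, pvCanon (fun n => counts.getD n 0) l) := by
  induction l using List.reverseRecOn with
  | nil => rfl
  | append_singleton l x ih =>
    rw [PySem.List.enumerate_append, List.foldl_append, ih]
    simp only [PySem.List.enumerate_cons, PySem.List.enumerate_nil,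
      List.foldl_cons, List.foldl_nil]
    by_cases hx : x ∈ l
    · have hc : PySem.Set.contains (PySem.Set.ofList l) x = true := by
        simpa [PySem.Set.contains, PySem.Set.mem_ofList] using hx
      rw [if_pos hc, pvOfList_append_mem hx, pvCanon_append_mem _ hx]
    · have hc : ¬ (PySem.Set.contains (PySem.Set.ofList l) x = true) := by
        simpa [PySem.Set.contains, PySem.Set.mem_ofList] using hx
      rw [if_neg hc, pvOfList_append_not_mem hx,
        pvCanon_append_not_mem _ hx]
      simp [PySem.Set.add, PySem.Set.contains, PySem.Set.mem_ofList, hx]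

theorem pvB_eq_canon (l : List Int) :
    create_uniques_list_alt l = pvCanon (fun n => (List.count n l : Int)) l := by
  simp only [create_uniques_list_alt,
    PySem.Dict.foldl_insert_getD_add_one_eq_counter]
  rw [pvB_pass]
  exact pvCanon_congr fun n hn => PySem.Dict.getD_counter l n

-- ===== VERDICT (by name: the statement is the Claim_ definition above) =====
theorem create_uniques_list_spec : Claim_equal_create_uniques_list := by
  intro l _
  unfold Spec_create_uniques_list
  rw [pvA_eq_canon, pvB_eq_canon]
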